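-- pv_equiv track=rewrite | github.com/k-harada/AtCoder | ABC/ABC299/B.py | solve
-- ===== SOURCE A (Python) =====
-- def solve(n, t, c_list, r_list):
--     if t in c_list:
--         s = t
--     else:
--         s = c_list[0]
--     w = 0
--     r = 0
--     for i in range(n):
--         if c_list[i] == s and r_list[i] > r:
--             w = i + 1
--             r = r_list[i]
--     return w
-- ===== SOURCE B (Python) =====
-- def solve(n, t, c_list, r_list):
--     s = t if t in c_list else c_list[0]
--     picks = [r_list[i] for i in range(n) if c_list[i] == s]
--     m = max(picks, default=0)
--     if m <= 0:
--         return 0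
--     return next(i + 1 for i in range(n) if c_list[i] == s and r_list[i] == m)
-- ===== Notes on version B (the rewrite author's own statement) =====
-- stated objective: alternative
-- what changed: Replaces A's single fused running-max loop carrying (winner, best) state with two stateless passes: build the list of matching-color ratings, take its max with floor 0, then locate the first index attaining that max.
import Mathlib
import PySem

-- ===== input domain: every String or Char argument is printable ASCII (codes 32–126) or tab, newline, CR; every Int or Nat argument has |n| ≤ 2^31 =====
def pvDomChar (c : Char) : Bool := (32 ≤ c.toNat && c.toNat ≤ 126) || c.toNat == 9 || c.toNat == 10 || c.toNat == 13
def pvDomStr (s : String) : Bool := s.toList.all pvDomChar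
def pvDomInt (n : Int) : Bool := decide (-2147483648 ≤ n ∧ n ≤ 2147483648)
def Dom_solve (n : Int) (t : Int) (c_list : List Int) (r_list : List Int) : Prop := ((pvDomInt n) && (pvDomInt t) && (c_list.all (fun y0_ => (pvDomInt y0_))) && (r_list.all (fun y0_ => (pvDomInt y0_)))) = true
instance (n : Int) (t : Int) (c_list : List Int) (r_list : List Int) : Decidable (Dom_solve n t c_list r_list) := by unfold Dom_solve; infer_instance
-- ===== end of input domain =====

-- B replaces A's fused running-max loop by two stateless passes (collect matching ratings + max, then
-- locate the first index attaining it); same cost, different decomposition.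

-- ===== PORT A =====
def solve (n : Int) (t : Int) (c_list : List Int) (r_list : List Int) : Int :=
  let s : Int := if c_list.contains t then t else PySem.List.pyGetD c_list 0 0
  let wr : Int × Int :=
    (PySem.List.pyRange 0 n 1).foldl
      (fun (wr : Int × Int) (i : Int) =>
        if PySem.List.pyGetD c_list i 0 = s ∧ PySem.List.pyGetD r_list i 0 > wr.2 then
          (i + 1, PySem.List.pyGetD r_list i 0)
        else wr)
      (0, 0)
  wr.1

-- ===== PORT B =====
def solve_alt (n : Int) (t : Int) (c_list : List Int) (r_list : List Int) : Int :=
  let s : Int := if c_list.contains t then t else PySem.List.pyGetD c_list 0 0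
  let picks : List Int :=
    ((PySem.List.pyRange 0 n 1).filter (fun i => PySem.List.pyGetD c_list i 0 == s)).map
      (fun i => PySem.List.pyGetD r_list i 0)
  let m : Int := PySem.List.maxD picks (fun x => x) 0
  if m ≤ 0 then 0
  else
    match (PySem.List.pyRange 0 n 1).find?
        (fun i => PySem.List.pyGetD c_list i 0 == s && PySem.List.pyGetD r_list i 0 == m) with
    | some i => i + 1
    | none => 0

-- ===== PRECONDITION & SPEC =====
-- Pre_ excludes exactly the inputs where Python A raises IndexError: c_list empty with t absent
-- (c_list[0]), an index of range(n) out of range of c_list, or an index out of range of r_list whose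
-- color matches s (Python touches r_list[i] only when c_list[i] == s, so a mismatching color there is fine).
def Pre_solve (n : Int) (t : Int) (c_list : List Int) (r_list : List Int) : Prop :=
  (t ∈ c_list ∨ c_list ≠ []) ∧ n ≤ (c_list.length : Int) ∧
  ∀ i ∈ PySem.List.pyRange (r_list.length : Int) n 1,
    PySem.List.pyGetD c_list i 0 ≠ (if c_list.contains t then t else PySem.List.pyGetD c_list 0 0)
instance (n : Int) (t : Int) (c_list : List Int) (r_list : List Int) : Decidable (Pre_solve n t c_list r_list) := by unfold Pre_solve; infer_instance
def pvWitness_solve : Int × Int × List Int × List Int := (3, 1, [1, 2, 1], [5, 7, 6])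

def Spec_solve (n : Int) (t : Int) (c_list : List Int) (r_list : List Int) (out : Int) : Prop := out = solve_alt n t c_list r_list
instance (n : Int) (t : Int) (c_list : List Int) (r_list : List Int) (out : Int) : Decidable (Spec_solve n t c_list r_list out) := by unfold Spec_solve; infer_instance

-- ===== CLAIM (what is proved, stated in full; the proofs are below) =====
def Claim_equal_solve : Prop := ∀ (n : Int) (t : Int) (c_list : List Int) (r_list : List Int), Dom_solve n t c_list r_list → Pre_solve n t c_list r_list → Spec_solve n t c_list r_list (solve n t c_list r_list)

-- ===== LEMMAS AND PROOFS =====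

-- A's loop body / running max / B's first-match locator, abstracted over the list of indices.
def pvStepA (c_list r_list : List Int) (s : Int) (wr : Int × Int) (i : Int) : Int × Int :=
  if PySem.List.pyGetD c_list i 0 = s ∧ PySem.List.pyGetD r_list i 0 > wr.2 then
    (i + 1, PySem.List.pyGetD r_list i 0)
  else wr

def pvRunMax (c_list r_list : List Int) (s : Int) (l : List Int) (a : Int) : Int :=
  l.foldl
    (fun a i =>
      if PySem.List.pyGetD c_list i 0 = s ∧ PySem.List.pyGetD r_list i 0 > a then
        PySem.List.pyGetD r_list i 0
      else a) a

def pvFind (c_list r_list : List Int) (s : Int) (l : List Int) (m : Int) : Int :=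
  match l.find? (fun i => PySem.List.pyGetD c_list i 0 == s && PySem.List.pyGetD r_list i 0 == m) with
  | some i => i + 1
  | none => 0

theorem pvRunMax_cons (c_list r_list : List Int) (s i : Int) (l : List Int) (a : Int) :
    pvRunMax c_list r_list s (i :: l) a =
      if PySem.List.pyGetD c_list i 0 = s ∧ PySem.List.pyGetD r_list i 0 > a then
        pvRunMax c_list r_list s l (PySem.List.pyGetD r_list i 0)
      else pvRunMax c_list r_list s l a := by
  simp only [pvRunMax, List.foldl_cons]
  split_ifs <;> rfl

theorem pvFind_cons (c_list r_list : List Int) (s i : Int) (l : List Int) (m : Int) :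
    pvFind c_list r_list s (i :: l) m =
      if (PySem.List.pyGetD c_list i 0 == s && PySem.List.pyGetD r_list i 0 == m) then i + 1
      else pvFind c_list r_list s l m := by
  by_cases hb : (PySem.List.pyGetD c_list i 0 == s && PySem.List.pyGetD r_list i 0 == m) = true <;>
    simp [pvFind, hb]

theorem pvRunMax_le (c_list r_list : List Int) (s : Int) (l : List Int) :
    ∀ a : Int, a ≤ pvRunMax c_list r_list s l a := by
  induction l with
  | nil => intro a; simp [pvRunMax]
  | cons i l ih =>
    intro a
    rw [pvRunMax_cons]
    split_ifs with h
    · exact le_trans (le_of_lt h.2) (ih _)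
    · exact ih a

theorem pvFold_fst (c_list r_list : List Int) (s : Int) (l : List Int) :
    ∀ w a : Int,
      (l.foldl (pvStepA c_list r_list s) (w, a)).1 =
        if pvRunMax c_list r_list s l a ≤ a then w
        else pvFind c_list r_list s l (pvRunMax c_list r_list s l a) := by
  induction l with
  | nil => intro w a; simp [pvRunMax]
  | cons i l ih =>
    intro w a
    simp only [List.foldl_cons]
    by_cases h : PySem.List.pyGetD c_list i 0 = s ∧ PySem.List.pyGetD r_list i 0 > a
    · rw [show pvStepA c_list r_list s (w, a) i = (i + 1, PySem.List.pyGetD r_list i 0) by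
        simp [pvStepA, h]]
      rw [ih, pvRunMax_cons, if_pos h]
      set M := pvRunMax c_list r_list s l (PySem.List.pyGetD r_list i 0) with hM
      have hle : PySem.List.pyGetD r_list i 0 ≤ M := pvRunMax_le c_list r_list s l _
      rw [if_neg (by omega : ¬ M ≤ a), pvFind_cons]
      by_cases he : PySem.List.pyGetD r_list i 0 = M
      · rw [if_pos (le_of_eq he.symm), if_pos (by simp [h.1, he])]
      · rw [if_neg (by omega : ¬ M ≤ PySem.List.pyGetD r_list i 0), if_neg (by simp [he])]
    · rw [show pvStepA c_list r_list s (w, a) i = (w, a) by simp [pvStepA, h]]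
      rw [ih, pvRunMax_cons, if_neg h]
      set M := pvRunMax c_list r_list s l a with hM
      by_cases hc : M ≤ a
      · rw [if_pos hc, if_pos hc]
      · rw [if_neg hc, if_neg hc, pvFind_cons]
        rw [if_neg (by
          by_cases hp : PySem.List.pyGetD c_list i 0 = s
          · have h1 : ¬ PySem.List.pyGetD r_list i 0 > a := fun hg => h ⟨hp, hg⟩
            have h2 : PySem.List.pyGetD r_list i 0 ≠ M := by omega
            simp [h2]
          · simp [hp])]

theorem pvRunMax_eq_foldl_max (c_list r_list : List Int) (s : Int) (l : List Int) :
    ∀ a : Int,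
      pvRunMax c_list r_list s l a =
        ((l.filter (fun i => PySem.List.pyGetD c_list i 0 == s)).map
          (fun i => PySem.List.pyGetD r_list i 0)).foldl max a := by
  induction l with
  | nil => intro a; simp [pvRunMax]
  | cons i l ih =>
    intro a
    rw [pvRunMax_cons]
    by_cases hp : PySem.List.pyGetD c_list i 0 = s
    · rw [List.filter_cons_of_pos (by simp [hp]), List.map_cons, List.foldl_cons]
      rw [show (if PySem.List.pyGetD c_list i 0 = s ∧ PySem.List.pyGetD r_list i 0 > a then
            pvRunMax c_list r_list s l (PySem.List.pyGetD r_list i 0)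
          else pvRunMax c_list r_list s l a) =
          pvRunMax c_list r_list s l (max a (PySem.List.pyGetD r_list i 0)) by
        by_cases hg : PySem.List.pyGetD r_list i 0 > a
        · rw [if_pos ⟨hp, hg⟩, show max a (PySem.List.pyGetD r_list i 0) = PySem.List.pyGetD r_list i 0 by omega]
        · rw [if_neg (fun hh => hg hh.2), show max a (PySem.List.pyGetD r_list i 0) = a by omega]]
      exact ih _
    · rw [List.filter_cons_of_neg (by simp [hp]), if_neg (fun hh => hp hh.1)]
      exact ih a

-- the whole equivalence, over an arbitrary list of indices (instantiated with pyRange 0 n 1)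
theorem pvKey (c_list r_list : List Int) (s : Int) (l : List Int) :
    (l.foldl (pvStepA c_list r_list s) (0, 0)).1 =
      (if PySem.List.maxD
            ((l.filter (fun i => PySem.List.pyGetD c_list i 0 == s)).map
              (fun i => PySem.List.pyGetD r_list i 0)) (fun x => x) 0 ≤ 0 then 0
       else
        match l.find? (fun i => PySem.List.pyGetD c_list i 0 == s &&
            PySem.List.pyGetD r_list i 0 ==
              PySem.List.maxD
                ((l.filter (fun i => PySem.List.pyGetD c_list i 0 == s)).map
                  (fun i => PySem.List.pyGetD r_list i 0)) (fun x => x) 0) with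
        | some i => i + 1
        | none => 0) := by
  rw [pvFold_fst]
  have hrm := pvRunMax_eq_foldl_max c_list r_list s l 0
  match hp : ((l.filter (fun i => PySem.List.pyGetD c_list i 0 == s)).map
      (fun i => PySem.List.pyGetD r_list i 0)) with
  | [] =>
    rw [hp] at hrm
    simp only [List.foldl_nil] at hrm
    simp [hrm, PySem.List.maxD, PySem.List.max?]
  | x :: tl =>
    have hm : PySem.List.maxD (x :: tl) (fun y => y) 0 = tl.foldl max x := by
      simp [PySem.List.maxD, PySem.List.max?_id_cons]
    rw [hp] at hrm
    have hrm2 : pvRunMax c_list r_list s l 0 = max 0 (tl.foldl max x) := by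
      rw [hrm]; exact List.foldl_assoc
    rw [hm, hrm2]
    by_cases hle : tl.foldl max x ≤ 0
    · rw [if_pos (by omega : max 0 (tl.foldl max x) ≤ 0), if_pos hle]
    · rw [if_neg (by omega : ¬ max 0 (tl.foldl max x) ≤ 0), if_neg hle]
      rw [show max 0 (tl.foldl max x) = tl.foldl max x by omega]
      rfl

-- ===== VERDICT (by name: the statement is the Claim_ definition above) =====
theorem solve_spec : Claim_equal_solve := by
  intro n t c_list r_list _ _
  unfold Spec_solve solve solve_alt
  exact pvKey c_list r_list
    (if c_list.contains t then t else PySem.List.pyGetD c_list 0 0)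
    (PySem.List.pyRange 0 n 1)
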